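-- pv_equiv track=rewrite | github.com/MrBrantCode/unitest_baseline | mut_generate/mist_train_taco/taco_10824/solution.py | calculate_minimum_changes
-- ===== SOURCE A (Python) =====
-- import math
--
-- def calculate_minimum_changes(n, a):
--     """
--     Calculate the minimum number of changes required for each non-empty prefix of the scene lengths to avoid boring the audience.
--
--     Parameters:
--     n (int): The number of classes.
--     a (list of int): The lengths of the class scenes.
--
--     Returns:
--     list of int: A sequence of integers representing the minimum number of changes required for each prefix of the scene lengths.
--     """
--     gcd = math.gcd
--     cnt = 0
--     ans = [0] * n
--     s = []
--     i = 0
--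
--     for x in a:
--         s.append([x, i])
--         for j in range(len(s) - 1, -1, -1):
--             x = gcd(s[j][0], x)
--             s[j][0] = x
--             if j + 1 < len(s) and s[j][0] == s[j + 1][0]:
--                 s.pop(j + 1)
--         for j in range(len(s) - 1, -1, -1):
--             if i - s[j][1] + 1 >= s[j][0] and (j + 1 >= len(s) or s[j + 1][1] > i - s[j][0] + 1):
--                 s = []
--                 cnt += 1
--                 break
--         ans[i] = cnt
--         i += 1
--
--     return ans
-- ===== SOURCE B (Python) =====
-- import math
--
-- def calculate_minimum_changes(n, a):
--     """Same result as A, but without the compressed distinct-GCD stack: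
--     track the start L of the current open segment and, for each index i,
--     scan backward from i recomputing the running suffix gcd directly."""
--     ans = [0] * n
--     cnt = 0
--     L = 0
--     for i, x in enumerate(a):
--         if x == 0:
--             # gcd of the empty suffix is 0 = its length, so a zero scene is
--             # immediately a "boring" segment.
--             boring = True
--         else:
--             boring = False
--             g = 0
--             for l in range(i, L - 1, -1):
--                 g = math.gcd(g, a[l])
--                 if g <= i - l + 1:
--                     # once g <= length, no shorter gcd can equal a longer length
--                     boring = (g == i - l + 1)
--                     break
--         if boring:
--             cnt += 1
--             L = i + 1
--         ans[i] = cnt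
--     return ans
-- ===== Notes on version B (the rewrite author's own statement) =====
-- stated objective: simpler
-- what changed: A maintains a compressed stack of distinct suffix-GCD blocks with in-place merging and a two-condition block scan; B drops the stack entirely and, per index, rescans the current open segment backward with a running gcd, triggering exactly when some suffix has gcd equal to its length (or the new element is 0), tracking only the segment start L.
import Mathlib
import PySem

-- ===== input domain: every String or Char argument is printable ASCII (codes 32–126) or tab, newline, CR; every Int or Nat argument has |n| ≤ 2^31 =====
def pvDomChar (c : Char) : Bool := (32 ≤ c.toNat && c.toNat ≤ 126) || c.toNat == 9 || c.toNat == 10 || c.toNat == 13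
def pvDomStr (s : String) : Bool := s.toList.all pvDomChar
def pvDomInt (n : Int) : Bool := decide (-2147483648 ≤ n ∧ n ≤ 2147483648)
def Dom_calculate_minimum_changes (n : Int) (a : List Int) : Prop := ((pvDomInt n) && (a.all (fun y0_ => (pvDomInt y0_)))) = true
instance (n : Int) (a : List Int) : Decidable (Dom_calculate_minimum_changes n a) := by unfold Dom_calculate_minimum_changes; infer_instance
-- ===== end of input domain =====

-- B replaces A's compressed distinct-suffix-GCD stack by a plain backward scan
-- from each index over the current open segment (objective: simpler; not faster).

-- ===== PORT A =====

-- math.gcd on Python ints (always nonnegative)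
def pyGcd (a b : Int) : Int := (Int.gcd a b : Int)

-- A's first inner loop: `for j in range(len(s)-1,-1,-1): x = gcd(s[j][0], x); s[j][0] = x;
-- if j+1 < len(s) and s[j][0] == s[j+1][0]: s.pop(j+1)` written as structural recursion from
-- the right: the threaded running `x` entering position j equals the already-updated value at
-- j+1 (the head of the processed tail), and equals the argument x0 at the last position.
def pass1go : List (Int × Int) → Int → List (Int × Int)
  | [], _ => []
  | (v, idx) :: rest, x0 =>
    match pass1go rest x0 with
    | [] => [(pyGcd v x0, idx)]
    | (w, k) :: rest' =>
      if pyGcd v w = w then (pyGcd v w, idx) :: rest'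
      else (pyGcd v w, idx) :: (w, k) :: rest'

-- the condition of A's second inner loop at entry (g, st) with right neighbour `next`
abbrev condI (i : Int) (p : Int × Int) (next : Option (Int × Int)) : Prop :=
  i - p.2 + 1 ≥ p.1 ∧ ∀ q ∈ next, q.2 > i - p.1 + 1

-- A's second inner loop: backward scan `for j in range(len(s)-1,-1,-1)` with the
-- right neighbour s[j+1] threaded as `next` (none for j = len(s)-1); first hit breaks.
def trigGo (i : Int) : List (Int × Int) → Option (Int × Int) → Bool
  | [], _ => false
  | p :: rest, next => if condI i p next then true else trigGo i rest (some p)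

-- A's outer `for x in a` loop with state (i, cnt, s, ans)
def loopA : List Int → Int → Int → List (Int × Int) → List Int → List Int
  | [], _, _, _, ans => ans
  | x :: rest, i, cnt, s, ans =>
    let s1 := pass1go (s ++ [(x, i)]) x
    let fired := trigGo i s1.reverse none
    let cnt' := if fired then cnt + 1 else cnt
    loopA rest (i + 1) cnt' (if fired then [] else s1) (ans.set i.toNat cnt')

def calculate_minimum_changes (n : Int) (a : List Int) : List Int :=
  loopA a 0 0 [] (List.replicate n.toNat 0)

-- ===== PORT B =====

-- Source B's inner `for l in range(i, L-1, -1)` loop: fuel counts the remaining iterations,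
-- the current index is l = L + fuel - 1; `break` returns, falling off the range gives false.
def scanB (a : List Int) (i L : Int) : Int → Nat → Bool
  | _, 0 => false
  | g, fuel + 1 =>
    let l : Int := L + (fuel : Int)
    let g' := pyGcd g (a.getD l.toNat 0)
    if g' ≤ i - l + 1 then decide (g' = i - l + 1)
    else scanB a i L g' fuel

-- Source B's outer loop with state (i, cnt, L)
def loopB (a0 : List Int) : List Int → Int → Int → Int → List Int → List Int
  | [], _, _, _, ans => ans
  | x :: rest, i, cnt, L, ans =>
    let boring := if x = 0 then true else scanB a0 i L 0 (i - L + 1).toNat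
    let cnt' := if boring then cnt + 1 else cnt
    loopB a0 rest (i + 1) cnt' (if boring then i + 1 else L) (ans.set i.toNat cnt')

def calculate_minimum_changes_alt (n : Int) (a : List Int) : List Int :=
  loopB a a 0 0 0 (List.replicate n.toNat 0)

-- ===== PRECONDITION & SPEC =====
-- Python A does `ans[i] = cnt` into ans = [0]*n, an IndexError when a is nonempty and
-- len(a) > n (B writes the same cells into the same [0]*n, so it raises there too):
-- Pre_ excludes exactly that.
def Pre_calculate_minimum_changes (n : Int) (a : List Int) : Prop := (a.length : Int) ≤ n ∨ a = []
instance (n : Int) (a : List Int) : Decidable (Pre_calculate_minimum_changes n a) := by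
  unfold Pre_calculate_minimum_changes; infer_instance

def pvWitness_calculate_minimum_changes : Int × List Int := (3, [4, 2, 6])

def Spec_calculate_minimum_changes (n : Int) (a : List Int) (out : List Int) : Prop := out = calculate_minimum_changes_alt n a
instance (n : Int) (a : List Int) (out : List Int) : Decidable (Spec_calculate_minimum_changes n a out) := by unfold Spec_calculate_minimum_changes; infer_instance

-- ===== CLAIM (what is proved, stated in full; the proofs are below) =====
def Claim_equal_calculate_minimum_changes : Prop := ∀ (n : Int) (a : List Int), Dom_calculate_minimum_changes n a → Pre_calculate_minimum_changes n a → Spec_calculate_minimum_changes n a (calculate_minimum_changes n a)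

-- ===== LEMMAS AND PROOFS =====

-- cast from the Nat-level model stack to the Int pairs the port stores
def castP (p : Nat × Nat) : Int × Int := ((p.1 : Int), (p.2 : Int))

-- Nat-level model of pass1go
def goM : List (Nat × Nat) → Nat → List (Nat × Nat)
  | [], _ => []
  | (v, idx) :: rest, x0 =>
    match goM rest x0 with
    | [] => [(Nat.gcd v x0, idx)]
    | (w, k) :: rest' =>
      if Nat.gcd v w = w then (Nat.gcd v w, idx) :: rest'
      else (Nat.gcd v w, idx) :: (w, k) :: rest'

-- gcd of the slice a[l..i] (absolute values; 0 for the empty slice), from the right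
def sg (a : List Int) (l i : Nat) : Nat :=
  if i < l then 0 else Nat.gcd (a.getD l 0).natAbs (sg a (l + 1) i)
termination_by i + 1 - l

theorem sg_stop {a : List Int} {l i : Nat} (h : i < l) : sg a l i = 0 := by
  rw [sg]; simp [h]

theorem sg_step {a : List Int} {l i : Nat} (h : l ≤ i) :
    sg a l i = Nat.gcd (a.getD l 0).natAbs (sg a (l + 1) i) := by
  rw [sg]; simp [Nat.not_lt.mpr h]

theorem sg_self (a : List Int) (i : Nat) : sg a i i = (a.getD i 0).natAbs := by
  rw [sg_step le_rfl, sg_stop (by omega), Nat.gcd_zero_right]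

theorem sg_dvd_add (a : List Int) (d l i : Nat) : sg a l i ∣ sg a (l + d) i := by
  induction d with
  | zero => exact dvd_rfl
  | succ d ih =>
    refine ih.trans ?_
    by_cases h : l + d ≤ i
    · rw [sg_step h]; exact Nat.gcd_dvd_right _ _
    · rw [sg_stop (by omega), sg_stop (by omega)]

theorem sg_dvd {a : List Int} {l l' i : Nat} (h : l ≤ l') : sg a l i ∣ sg a l' i := by
  obtain ⟨d, rfl⟩ := Nat.exists_eq_add_of_le h
  exact sg_dvd_add a d l i

theorem sg_snoc_aux (a : List Int) (i : Nat) :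
    ∀ (d l : Nat), i + 1 = l + d →
      sg a l (i + 1) = Nat.gcd (sg a l i) (a.getD (i + 1) 0).natAbs := by
  intro d
  induction d with
  | zero =>
    intro l h
    have : l = i + 1 := by omega
    subst this
    rw [sg_self, sg_stop (by omega), Nat.gcd_zero_left]
  | succ d ih =>
    intro l h
    have hl : l ≤ i := by omega
    rw [sg_step (by omega : l ≤ i + 1), sg_step hl, ih (l + 1) (by omega), Nat.gcd_assoc]

theorem sg_snoc {a : List Int} {l i : Nat} (h : l ≤ i + 1) :
    sg a l (i + 1) = Nat.gcd (sg a l i) (a.getD (i + 1) 0).natAbs := by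
  exact sg_snoc_aux a i (i + 1 - l) l (by omega)

theorem sg_ne_zero {a : List Int} {i : Nat} (h : a.getD i 0 ≠ 0) :
    ∀ l, l ≤ i → sg a l i ≠ 0 := by
  intro l hl h0
  have hd : sg a l i ∣ sg a i i := sg_dvd hl
  rw [h0] at hd
  have : sg a i i = 0 := Nat.eq_zero_of_zero_dvd hd
  rw [sg_self] at this
  exact h (Int.natAbs_eq_zero.mp this)

-- invariant of A's stack for the open segment [lo, i] (Nat-level model)
structure GoodFrom (a : List Int) (lo i : Nat) (t : List (Nat × Nat)) : Prop where
  ne : t ≠ []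
  head : t.head? = some (sg a lo i, lo)
  hloi : lo ≤ i
  mem : ∀ p ∈ t, lo ≤ p.2 ∧ p.2 ≤ i ∧ p.1 = sg a p.2 i
  sorted : t.Pairwise (fun p q => p.2 < q.2)
  distinct : t.IsChain (fun p q => p.1 ≠ q.1)
  blocks : t.IsChain (fun p q => ∀ l, p.2 ≤ l → l < q.2 → sg a l i = p.1)
  lastb : ∀ p, t.getLast? = some p → ∀ l, p.2 ≤ l → l ≤ i → sg a l i = p.1

theorem GoodFrom.tail {a : List Int} {lo i : Nat} {p q : Nat × Nat} {r : List (Nat × Nat)}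
    (h : GoodFrom a lo i (p :: q :: r)) : GoodFrom a q.2 i (q :: r) := by
  have hq := h.mem q (by simp)
  refine ⟨by simp, ?_, hq.2.1, ?_, h.sorted.of_cons, h.distinct.tail, h.blocks.tail, ?_⟩
  · simp only [List.head?_cons, Option.some_inj]
    exact Prod.ext_iff.mpr ⟨hq.2.2, rfl⟩
  · intro p' hp'
    rcases List.mem_cons.mp hp' with h1 | h1
    · subst h1; exact ⟨le_rfl, hq.2.1, hq.2.2⟩
    · have hmem := h.mem p' (by simp [h1])
      have hlt : q.2 < p'.2 := List.rel_of_pairwise_cons h.sorted.of_cons h1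
      exact ⟨le_of_lt hlt, hmem.2.1, hmem.2.2⟩
  · intro p' hp'
    exact h.lastb p' (by rwa [List.getLast?_cons_cons])

theorem goM_ne {v idx : Nat} {rest : List (Nat × Nat)} {x : Nat} :
    goM ((v, idx) :: rest) x ≠ [] := by
  rw [goM]
  cases goM rest x with
  | nil => simp
  | cons q r => obtain ⟨w, k⟩ := q; dsimp only; split <;> simp

theorem goM_ne' {t : List (Nat × Nat)} (h : t ≠ []) {x : Nat} : goM t x ≠ [] := by
  cases t with
  | nil => exact absurd rfl h
  | cons p r => obtain ⟨v, idx⟩ := p; exact goM_ne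

-- pass1go on casted pairs is the Nat-level model
theorem pass1_cast (x : Int) (i : Nat) :
    ∀ (t : List (Nat × Nat)),
      pass1go (t.map castP ++ [(x, (i : Int))]) x
        = (goM (t ++ [(x.natAbs, i)]) x.natAbs).map castP := by
  intro t
  induction t with
  | nil =>
    simp only [List.map_nil, List.nil_append, pass1go, goM, List.map_cons, List.map_nil]
    rw [Nat.gcd_self]
    simp [pyGcd, Int.gcd_self, castP]
  | cons p rest ih =>
    obtain ⟨v, idx⟩ := p
    cases hg : goM (rest ++ [(x.natAbs, i)]) x.natAbs with
    | nil => exact absurd hg (goM_ne' (by simp))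
    | cons q r =>
      obtain ⟨w, k⟩ := q
      have hpy : pyGcd (v : Int) (w : Int) = ((Nat.gcd v w : Nat) : Int) := by
        simp [pyGcd, Int.gcd_natCast_natCast]
      simp only [List.map_cons, List.cons_append, castP]
      rw [pass1go, ih, hg, goM, hg]
      simp only [List.map_cons, castP]
      by_cases heq : Nat.gcd v w = w
      · rw [if_pos (show pyGcd (v : Int) (w : Int) = (w : Int) by
            rw [hpy]; exact_mod_cast congrArg (Nat.cast (R := Int)) heq), if_pos heq]
        simp [castP, hpy]
      · rw [if_neg (fun hcon => heq (by
            rw [hpy] at hcon; exact_mod_cast hcon)), if_neg heq]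
        simp [castP, hpy]

-- forward-order reading of trigGo on the reversed stack
def firesF (i : Int) (nxt : Option (Int × Int)) : List (Int × Int) → Prop
  | [] => False
  | [p] => condI i p nxt
  | p :: q :: rest => condI i p (some q) ∨ firesF i nxt (q :: rest)

theorem firesF_append (i : Int) (p : Int × Int) :
    ∀ (u : List (Int × Int)) (nxt : Option (Int × Int)),
      firesF i nxt (u ++ [p]) ↔ firesF i (some p) u ∨ condI i p nxt := by
  intro u
  induction u with
  | nil => simp [firesF]
  | cons q u ih =>
    intro nxt
    cases u with
    | nil => simp [firesF]
    | cons q' u' =>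
      have h1 : firesF i nxt ((q :: q' :: u') ++ [p])
          = (condI i q (some q') ∨ firesF i nxt ((q' :: u') ++ [p])) := by
        simp [firesF]
      have h2 : firesF i (some p) (q :: q' :: u')
          = (condI i q (some q') ∨ firesF i (some p) (q' :: u')) := by
        simp [firesF]
      rw [h1, h2, ih nxt]
      tauto

theorem trigGo_reverse (i : Int) :
    ∀ (u : List (Int × Int)) (nxt : Option (Int × Int)),
      trigGo i u.reverse nxt = true ↔ firesF i nxt u := by
  intro u
  induction u using List.reverseRecOn with
  | nil => simp [trigGo, firesF]
  | append_singleton u p ih =>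
    intro nxt
    rw [List.reverse_append]
    simp only [List.reverse_cons, List.reverse_nil, List.nil_append, List.singleton_append]
    rw [trigGo]
    rw [firesF_append]
    split_ifs with hc
    · exact iff_of_true rfl (Or.inr hc)
    · rw [ih (some p)]
      constructor
      · exact fun h => Or.inl h
      · rintro (h | h)
        · exact h
        · exact absurd h hc

-- A's trigger, given the invariant, means: the newest element is 0, or some segment
-- [l, i] inside the open segment has gcd exactly equal to its length
theorem fires_iff (a : List Int) :
    ∀ (t : List (Nat × Nat)) (lo i : Nat), GoodFrom a lo i t →
      (firesF (i : Int) none (t.map castP) ↔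
        (a.getD i 0 = 0 ∨ ∃ l, lo ≤ l ∧ l ≤ i ∧ ((sg a l i : Nat) : Int) = (i : Int) - l + 1)) := by
  intro t
  induction t with
  | nil => intro lo i h; exact absurd rfl h.ne
  | cons p t ih =>
    intro lo i h
    obtain ⟨g, st⟩ := p
    have hhead : g = sg a lo i ∧ st = lo := by
      have := h.head; simp only [List.head?_cons, Option.some_inj, Prod.ext_iff] at this
      exact this
    obtain ⟨hg, hst⟩ := hhead
    have hsti : st ≤ i := (h.mem (g, st) (by simp)).2.1
    cases t with
    | nil =>
      have hlast : ∀ l, st ≤ l → l ≤ i → sg a l i = g :=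
        h.lastb (g, st) (by simp)
      simp only [List.map_cons, List.map_nil, firesF, castP, condI, Option.mem_def,
        reduceCtorEq, false_implies, implies_true, and_true, ge_iff_le]
      constructor
      · intro hc
        by_cases hg0 : g = 0
        · left
          have : sg a i i = 0 := by rw [hlast i hsti le_rfl, hg0]
          rw [sg_self] at this
          exact Int.natAbs_eq_zero.mp this
        · right
          have hgle : g ≤ i - st + 1 := by
            have hgle' : (g : Int) ≤ (i : Int) - st + 1 := hc
            omega
          refine ⟨i + 1 - g, by omega, by omega, ?_⟩
          rw [hlast (i + 1 - g) (by omega) (by omega)]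
          omega
      · rintro (h0 | ⟨l, hl1, hl2, hl3⟩)
        · have hz : sg a i i = 0 := by rw [sg_self, h0]; rfl
          have hgz : g = 0 := by rw [hlast i hsti le_rfl] at hz; exact hz
          rw [hgz]
          omega
        · have : sg a l i = g := hlast l (hst ▸ hl1) hl2
          rw [this] at hl3
          have : (g : Int) = (i : Int) - l + 1 := hl3
          omega
    | cons q t' =>
      have htail : GoodFrom a q.2 i (q :: t') := h.tail
      have ihq := ih q.2 i htail
      have hq2 : q.1 = sg a q.2 i := (h.mem q (by simp)).2.2
      have hq2i : q.2 ≤ i := (h.mem q (by simp)).2.1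
      have hstq : st < q.2 := List.rel_of_pairwise_cons h.sorted (by simp)
      have hblk : ∀ l, st ≤ l → l < q.2 → sg a l i = g := by
        have := (List.isChain_cons.mp h.blocks).1 q (by simp)
        exact this
      have hdist : g ≠ q.1 := (List.isChain_cons.mp h.distinct).1 q (by simp)
      have hloq : lo ≤ q.2 := le_of_lt (hst ▸ hstq)
      have hsplit : firesF (i : Int) none (((g, st) :: q :: t').map castP)
          ↔ (condI (i : Int) (castP (g, st)) (some (castP q)) ∨
              firesF (i : Int) none ((q :: t').map castP)) := by
        simp [firesF]
      rw [hsplit, ihq]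
      constructor
      · rintro (hc | hr)
        · -- the head entry fires
          obtain ⟨hc1, hc2⟩ := hc
          have hc2' : ((q.2 : Int)) > (i : Int) - g + 1 := by
            have := hc2 (castP q) rfl
            simpa [castP] using this
          by_cases hg0 : g = 0
          · exfalso
            have : sg a st i ∣ sg a q.2 i := sg_dvd (le_of_lt hstq)
            rw [hst, ← hg, hg0] at this
            have : sg a q.2 i = 0 := Nat.eq_zero_of_zero_dvd this
            exact hdist (by rw [hq2, this, hg0])
          · right
            have hc1' : (g : Int) ≤ (i : Int) - st + 1 := by simpa [castP] using hc1
            refine ⟨i + 1 - g, by omega, by omega, ?_⟩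
            rw [hblk (i + 1 - g) (by omega) (by omega)]
            omega
        · rcases hr with h0 | ⟨l, hl1, hl2, hl3⟩
          · exact Or.inl h0
          · exact Or.inr ⟨l, le_trans hloq hl1, hl2, hl3⟩
      · rintro (h0 | ⟨l, hl1, hl2, hl3⟩)
        · exact Or.inr (Or.inl h0)
        · by_cases hlq : l < q.2
          · left
            have hsgl : sg a l i = g := hblk l (hst ▸ hl1) hlq
            rw [hsgl] at hl3
            refine ⟨?_, ?_⟩
            · show (i : Int) - st + 1 ≥ g
              have : st ≤ l := hst ▸ hl1
              omega
            · intro x hx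
              rw [Option.mem_def, Option.some_inj] at hx
              subst hx
              show ((q.2 : Nat) : Int) > (i : Int) - g + 1
              have : (g : Int) = (i : Int) - l + 1 := hl3
              omega
          · exact Or.inr (Or.inr ⟨l, by omega, hl2, hl3⟩)

-- single-entry invariant for a freshly opened segment
theorem good_single (a : List Int) (k : Nat) :
    GoodFrom a k k [((a.getD k 0).natAbs, k)] := by
  refine ⟨by simp, by simp [sg_self], le_rfl, ?_, by simp,
    List.isChain_singleton _, List.isChain_singleton _, ?_⟩
  · intro p hp
    rw [List.mem_singleton] at hp
    subst hp
    exact ⟨le_rfl, le_rfl, (sg_self a k).symm⟩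
  · intro p hp l h1 h2
    rw [List.getLast?_singleton, Option.some_inj] at hp
    subst hp
    simp only at h1 h2 ⊢
    have : l = k := le_antisymm h2 h1
    subst this
    exact sg_self a l

-- the stack update preserves the invariant when the segment is extended by a[i+1]
theorem goM_good (a : List Int) (i : Nat) :
    ∀ (t : List (Nat × Nat)) (lo : Nat), GoodFrom a lo i t →
      GoodFrom a lo (i + 1)
        (goM (t ++ [((a.getD (i + 1) 0).natAbs, i + 1)]) (a.getD (i + 1) 0).natAbs) := by
  set x' := (a.getD (i + 1) 0).natAbs with hx'
  have hx'self : sg a (i + 1) (i + 1) = x' := sg_self a (i + 1)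
  intro t
  induction t with
  | nil => intro lo h; exact absurd rfl h.ne
  | cons p rest ih =>
    intro lo h
    obtain ⟨v, st⟩ := p
    have hhead : v = sg a lo i ∧ st = lo := by
      have := h.head; simp only [List.head?_cons, Option.some_inj, Prod.ext_iff] at this
      exact this
    obtain ⟨hv, hst⟩ := hhead
    have hsti : st ≤ i := (h.mem (v, st) (by simp)).2.1
    have hvst : v = sg a st i := by rw [hv, hst]
    have hg'snoc : Nat.gcd v x' = sg a st (i + 1) := by
      rw [sg_snoc (by omega), hvst]
    cases rest with
    | nil =>
      have hlast : ∀ l, st ≤ l → l ≤ i → sg a l i = v :=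
        h.lastb (v, st) (by simp)
      have hconst : ∀ l, st ≤ l → l ≤ i → sg a l (i + 1) = Nat.gcd v x' := by
        intro l h1 h2
        rw [sg_snoc (by omega), hlast l h1 h2]
      simp only [List.cons_append, List.nil_append, goM, Nat.gcd_self]
      by_cases hpop : Nat.gcd v x' = x'
      · rw [if_pos hpop]
        refine ⟨by simp, ?_, by omega, ?_, by simp, List.isChain_singleton _,
          List.isChain_singleton _, ?_⟩
        · simp only [List.head?_cons, Option.some_inj, Prod.ext_iff]
          exact ⟨by rw [hg'snoc, hst], hst⟩
        · intro p' hp'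
          rw [List.mem_singleton] at hp'
          subst hp'
          exact ⟨hst ▸ le_rfl, by omega, by rw [hg'snoc]⟩
        · intro p' hp' l h1 h2
          rw [List.getLast?_singleton, Option.some_inj] at hp'
          subst hp'
          simp only at h1 h2 ⊢
          rcases Nat.lt_or_ge l (i + 1) with hli | hli
          · exact hconst l h1 (by omega)
          · have : l = i + 1 := by omega
            subst this
            rw [hx'self, hpop]
      · rw [if_neg hpop]
        refine ⟨by simp, ?_, by omega, ?_, ?_, ?_, ?_, ?_⟩
        · simp only [List.head?_cons, Option.some_inj, Prod.ext_iff]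
          exact ⟨by rw [hg'snoc, hst], hst⟩
        · intro p' hp'
          rcases List.mem_cons.mp hp' with h1 | h1
          · subst h1
            exact ⟨hst ▸ le_rfl, by omega, by rw [hg'snoc]⟩
          · rw [List.mem_singleton] at h1
            subst h1
            exact ⟨by omega, le_rfl, hx'self.symm⟩
        · refine List.pairwise_cons.mpr ⟨?_, by simp⟩
          intro p' hp'
          rw [List.mem_singleton] at hp'
          subst hp'
          show st < i + 1
          omega
        · refine List.isChain_cons.mpr ⟨?_, List.isChain_singleton _⟩
          intro y hy
          simp only [List.head?_cons, Option.mem_def, Option.some_inj] at hy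
          subst hy
          exact hpop
        · refine List.isChain_cons.mpr ⟨?_, List.isChain_singleton _⟩
          intro y hy
          simp only [List.head?_cons, Option.mem_def, Option.some_inj] at hy
          subst hy
          intro l h1 h2
          simp only at h2 ⊢
          exact hconst l h1 (by omega)
        · intro p' hp' l h1 h2
          rw [List.getLast?_cons_cons, List.getLast?_singleton, Option.some_inj] at hp'
          subst hp'
          simp only at h1 h2 ⊢
          have : l = i + 1 := by omega
          subst this
          exact hx'self
    | cons q rest' =>
      have htail : GoodFrom a q.2 i (q :: rest') := h.tail
      have ihr := ih q.2 htail
      have hq : q.1 = sg a q.2 i := (h.mem q (by simp)).2.2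
      have hq2i : q.2 ≤ i := (h.mem q (by simp)).2.1
      have hloq : lo ≤ q.2 := (h.mem q (by simp)).1
      have hstq : st < q.2 := List.rel_of_pairwise_cons h.sorted (by simp)
      have hblkpq : ∀ l, st ≤ l → l < q.2 → sg a l i = v :=
        (List.isChain_cons.mp h.blocks).1 q (by simp)
      cases hr : goM ((q :: rest') ++ [(x', i + 1)]) x' with
      | nil => rw [hr] at ihr; exact absurd rfl ihr.ne
      | cons w r'' =>
        rw [hr] at ihr
        have hw : w.1 = sg a q.2 (i + 1) ∧ w.2 = q.2 := by
          have := ihr.head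
          simp only [List.head?_cons, Option.some_inj, Prod.ext_iff] at this
          exact this
        have hdvd : v ∣ sg a q.2 i := by
          rw [hvst]; exact sg_dvd (le_of_lt hstq)
        have hg'x : Nat.gcd v w.1 = Nat.gcd v x' := by
          rw [hw.1, sg_snoc (by omega), ← Nat.gcd_assoc, Nat.gcd_eq_left hdvd]
        have hg' : Nat.gcd v w.1 = sg a st (i + 1) := by rw [hg'x, hg'snoc]
        have hkey : ∀ l, st ≤ l → l < q.2 → sg a l (i + 1) = Nat.gcd v w.1 := by
          intro l h1 h2
          rw [sg_snoc (by omega), hblkpq l h1 h2, hg'x]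
        have hgoal : goM (((v, st) :: q :: rest') ++ [(x', i + 1)]) x'
            = if Nat.gcd v w.1 = w.1 then (Nat.gcd v w.1, st) :: r''
              else (Nat.gcd v w.1, st) :: w :: r'' := by
          rw [List.cons_append, goM, hr]
        rw [hgoal]
        by_cases hpop : Nat.gcd v w.1 = w.1
        · rw [if_pos hpop]
          refine ⟨by simp, ?_, by omega, ?_, ?_, ?_, ?_, ?_⟩
          · simp only [List.head?_cons, Option.some_inj, Prod.ext_iff]
            exact ⟨by rw [hg', hst], hst⟩
          · intro p' hp'
            rcases List.mem_cons.mp hp' with h1 | h1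
            · subst h1
              exact ⟨hst ▸ le_rfl, by omega, by rw [hg']⟩
            · have := ihr.mem p' (by simp [h1])
              exact ⟨le_trans hloq this.1, this.2.1, this.2.2⟩
          · refine List.pairwise_cons.mpr ⟨?_, ihr.sorted.of_cons⟩
            intro p' hp'
            have := (ihr.mem p' (by simp [hp'])).1
            show st < p'.2
            omega
          · refine List.isChain_cons.mpr ⟨?_, (List.isChain_cons.mp ihr.distinct).2⟩
            intro y hy
            have := (List.isChain_cons.mp ihr.distinct).1 y hy
            rw [hpop]
            exact this
          · refine List.isChain_cons.mpr ⟨?_, (List.isChain_cons.mp ihr.blocks).2⟩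
            intro y hy l h1 h2
            rcases Nat.lt_or_ge l q.2 with hlq | hlq
            · exact hkey l h1 hlq
            · have := (List.isChain_cons.mp ihr.blocks).1 y hy l (hw.2 ▸ hlq) h2
              rw [this, hpop]
          · intro p' hp' l h1 h2
            cases r'' with
            | nil =>
              rw [List.getLast?_singleton, Option.some_inj] at hp'
              subst hp'
              simp only at h1 h2 ⊢
              rcases Nat.lt_or_ge l q.2 with hlq | hlq
              · exact hkey l h1 hlq
              · have := ihr.lastb w (by simp) l (hw.2 ▸ hlq) h2
                rw [this, hpop]
            | cons z r3 =>
              rw [List.getLast?_cons_cons] at hp'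
              exact ihr.lastb p' (by rw [List.getLast?_cons_cons]; exact hp') l h1 h2
        · rw [if_neg hpop]
          refine ⟨by simp, ?_, by omega, ?_, ?_, ?_, ?_, ?_⟩
          · simp only [List.head?_cons, Option.some_inj, Prod.ext_iff]
            exact ⟨by rw [hg', hst], hst⟩
          · intro p' hp'
            rcases List.mem_cons.mp hp' with h1 | h1
            · subst h1
              exact ⟨hst ▸ le_rfl, by omega, by rw [hg']⟩
            · have := ihr.mem p' h1
              exact ⟨le_trans hloq this.1, this.2.1, this.2.2⟩
          · refine List.pairwise_cons.mpr ⟨?_, ihr.sorted⟩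
            intro p' hp'
            rcases List.mem_cons.mp hp' with h1 | h1
            · subst h1
              show st < p'.2
              omega
            · have := List.rel_of_pairwise_cons ihr.sorted h1
              show st < p'.2
              omega
          · refine List.isChain_cons.mpr ⟨?_, ihr.distinct⟩
            intro y hy
            simp only [List.head?_cons, Option.mem_def, Option.some_inj] at hy
            subst hy
            exact hpop
          · refine List.isChain_cons.mpr ⟨?_, ihr.blocks⟩
            intro y hy
            simp only [List.head?_cons, Option.mem_def, Option.some_inj] at hy
            subst hy
            intro l h1 h2
            exact hkey l h1 (hw.2 ▸ h2)
          · intro p' hp' l h1 h2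
            rw [List.getLast?_cons_cons] at hp'
            exact ihr.lastb p' hp' l h1 h2

-- B's inner scan finds exactly the segments whose gcd equals their length
theorem scanB_spec (a : List Int) (i L : Nat) (hi : a.getD i 0 ≠ 0) :
    ∀ (fuel : Nat), L + fuel ≤ i + 1 → ∀ (g : Nat), g = sg a (L + fuel) i →
      (scanB a (i : Int) (L : Int) (g : Int) fuel = true ↔
        ∃ l, L ≤ l ∧ l < L + fuel ∧ ((sg a l i : Nat) : Int) = (i : Int) - l + 1) := by
  intro fuel
  induction fuel with
  | zero =>
    intro _ g _
    simp only [scanB, Bool.false_eq_true, false_iff]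
    rintro ⟨l, h1, h2, _⟩
    omega
  | succ fuel ih =>
    intro hle g hg
    have hlt : L + fuel ≤ i := by omega
    have hl_toNat : ((L : Int) + (fuel : Int)).toNat = L + fuel := by omega
    have hgstep : sg a (L + fuel) i = Nat.gcd g (a.getD (L + fuel) 0).natAbs := by
      rw [sg_step hlt, Nat.gcd_comm]
      exact congrArg (Nat.gcd · _) hg.symm
    have hgcd : pyGcd (g : Int) (a.getD (L + fuel) 0) = ((sg a (L + fuel) i : Nat) : Int) := by
      rw [pyGcd, hgstep]
      simp [Int.gcd]
    set m := sg a (L + fuel) i with hm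
    have hm1 : m ≠ 0 := sg_ne_zero hi _ hlt
    rw [scanB]
    simp only [hl_toNat, hgcd]
    split_ifs with hbr
    · rw [decide_eq_true_iff]
      constructor
      · intro heq
        exact ⟨L + fuel, by omega, by omega, by push_cast; omega⟩
      · rintro ⟨l, h1, h2, h3⟩
        by_cases hl : l = L + fuel
        · subst hl; push_cast at h3 ⊢; omega
        · exfalso
          have hdvd : sg a l i ∣ m := sg_dvd (by omega)
          have hne : sg a l i ≠ 0 := sg_ne_zero hi _ (by omega)
          have hle' : sg a l i ≤ m := Nat.le_of_dvd (Nat.pos_of_ne_zero hm1) hdvd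
          push_cast at h3 hbr
          omega
    · rw [ih (by omega) m rfl]
      constructor
      · rintro ⟨l, h1, h2, h3⟩
        exact ⟨l, h1, by omega, h3⟩
      · rintro ⟨l, h1, h2, h3⟩
        by_cases hl : l = L + fuel
        · exfalso; subst hl; push_cast at h3 hbr; omega
        · exact ⟨l, h1, by omega, h3⟩

theorem loop_eq (a0 : List Int) :
    ∀ (rest : List Int) (k : Nat) (cnt : Int) (L : Nat) (t : List (Nat × Nat)) (ans : List Int),
      rest = a0.drop k →
      ((L = k ∧ t = []) ∨ (L < k ∧ GoodFrom a0 L (k - 1) t)) →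
      loopA rest (k : Int) cnt (t.map castP) ans = loopB a0 rest (k : Int) cnt (L : Int) ans := by
  intro rest
  induction rest with
  | nil => intro k cnt L t ans _ _; rfl
  | cons x rest2 ih =>
    intro k cnt L t ans hdrop hinv
    have hk? : a0[k]? = some x := by
      rw [← List.head?_drop, ← hdrop, List.head?_cons]
    have hx : a0.getD k 0 = x := by
      rw [List.getD_eq_getElem?_getD, hk?, Option.getD_some]
    have hdrop' : rest2 = a0.drop (k + 1) := by
      have : a0.drop (k + 1) = (a0.drop k).drop 1 := by
        rw [List.drop_drop]
      rw [this, ← hdrop, List.drop_one, List.tail_cons]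
    have hLk : L ≤ k := by rcases hinv with ⟨h1, _⟩ | ⟨h1, _⟩ <;> omega
    -- the A-side stack after the update, at the Nat level
    have hbridge := pass1_cast x k t
    set t1 := goM (t ++ [(x.natAbs, k)]) x.natAbs with ht1
    have hgood : GoodFrom a0 L k t1 := by
      rcases hinv with ⟨h1, h2⟩ | ⟨h1, h2⟩
      · subst h2
        have ht1e : t1 = [((a0.getD k 0).natAbs, k)] := by
          rw [ht1, List.nil_append, goM, goM, Nat.gcd_self, hx]
        rw [ht1e, h1]
        exact good_single a0 k
      · have hk1 : k - 1 + 1 = k := by omega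
        have := goM_good a0 (k - 1) t L h2
        rw [hk1, hx] at this
        rw [ht1]
        exact this
    -- both triggers are the semantic condition P
    have hTA : (trigGo (k : Int) ((t1.map castP).reverse) none = true) ↔
        (a0.getD k 0 = 0 ∨ ∃ l, L ≤ l ∧ l ≤ k ∧ ((sg a0 l k : Nat) : Int) = (k : Int) - l + 1) :=
      (trigGo_reverse (k : Int) (t1.map castP) none).trans (fires_iff a0 t1 L k hgood)
    have hTB : ((if x = 0 then true else scanB a0 (k : Int) (L : Int) 0 (((k : Int) - (L : Int) + 1).toNat)) = true) ↔
        (a0.getD k 0 = 0 ∨ ∃ l, L ≤ l ∧ l ≤ k ∧ ((sg a0 l k : Nat) : Int) = (k : Int) - l + 1) := by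
      by_cases hx0 : x = 0
      · rw [if_pos hx0]
        simp only [true_iff]
        exact Or.inl (by rw [hx, hx0])
      · rw [if_neg hx0]
        have hi : a0.getD k 0 ≠ 0 := by rw [hx]; exact hx0
        have hfuel : (((k : Int) - (L : Int) + 1).toNat) = k + 1 - L := by omega
        have hsum : L + (k + 1 - L) = k + 1 := by omega
        have hg0 : (0 : Nat) = sg a0 (L + (k + 1 - L)) k := by
          rw [hsum, sg_stop (by omega)]
        have hspec := scanB_spec a0 k L hi (k + 1 - L) (by omega) 0 hg0
        rw [hfuel]
        rw [Nat.cast_zero] at hspec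
        rw [hspec]
        constructor
        · rintro ⟨l, h1, h2, h3⟩
          exact Or.inr ⟨l, h1, by omega, h3⟩
        · rintro (h0 | ⟨l, h1, h2, h3⟩)
          · exact absurd h0 hi
          · exact ⟨l, h1, by omega, h3⟩
    have hiff := hTA.trans hTB.symm
    have hfire : trigGo (k : Int) ((t1.map castP).reverse) none
        = (if x = 0 then true else scanB a0 (k : Int) (L : Int) 0 (((k : Int) - (L : Int) + 1).toNat)) := by
      cases hA : trigGo (k : Int) ((t1.map castP).reverse) none with
      | false =>
        cases hB : (if x = 0 then true else scanB a0 (k : Int) (L : Int) 0 (((k : Int) - (L : Int) + 1).toNat)) with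
        | false => rfl
        | true =>
          have hcon := hiff.mpr hB
          rw [hA] at hcon
          exact absurd hcon (by simp)
      | true => exact (hiff.mp hA).symm
    have hcast1 : (k : Int) + 1 = ((k + 1 : Nat) : Int) := by push_cast; ring
    rw [loopA, loopB]
    simp only [hbridge, hfire]
    cases hf : (if x = 0 then true else scanB a0 (k : Int) (L : Int) 0 (((k : Int) - (L : Int) + 1).toNat)) with
    | false =>
      simp only [Bool.false_eq_true, if_false]
      rw [hcast1]
      exact ih (k + 1) cnt L t1 _ hdrop' (Or.inr ⟨by omega, by simpa using hgood⟩)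
    | true =>
      simp only [if_true]
      rw [hcast1]
      have := ih (k + 1) (cnt + 1) (k + 1) [] (ans.set (k : Int).toNat (cnt + 1)) hdrop' (Or.inl ⟨rfl, rfl⟩)
      simpa using this

-- ===== VERDICT (by name: the statement is the Claim_ definition above) =====
theorem calculate_minimum_changes_spec : Claim_equal_calculate_minimum_changes := by
  intro n a _ _
  unfold Spec_calculate_minimum_changes calculate_minimum_changes calculate_minimum_changes_alt
  have := loop_eq a a 0 0 0 [] (List.replicate n.toNat 0) (by simp) (Or.inl ⟨rfl, rfl⟩)
  simpa using this
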